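-- pv_equiv track=rewrite | github.com/walidbenf/boot.dev-python | CH08/calculate_flurry_crit.py | calculate_flurry_crit
-- ===== SOURCE A (Python) =====
-- def calculate_flurry_crit(num_attacks, base_damage):
--     total_damage = 0
--     for i in range (-1, num_attacks):
--         if (i == num_attacks):
--             total_damage += base_damage * 4
--         else:
--             total_damage += base_damage * 2
--     if (num_attacks == 0):
--         return 0
--     return total_damage
-- ===== SOURCE B (Python) =====
-- def calculate_flurry_crit(num_attacks, base_damage):
--     if num_attacks <= 0:
--         return 0
--     return (num_attacks + 1) * base_damage * 2
-- ===== Notes on version B (the rewrite author's own statement) =====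
-- stated objective: faster
-- what changed: Replaced the per-attack accumulation loop (with its dead i==num_attacks branch) by the closed form (num_attacks+1)*base_damage*2, 0 for non-positive counts.
import Mathlib
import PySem

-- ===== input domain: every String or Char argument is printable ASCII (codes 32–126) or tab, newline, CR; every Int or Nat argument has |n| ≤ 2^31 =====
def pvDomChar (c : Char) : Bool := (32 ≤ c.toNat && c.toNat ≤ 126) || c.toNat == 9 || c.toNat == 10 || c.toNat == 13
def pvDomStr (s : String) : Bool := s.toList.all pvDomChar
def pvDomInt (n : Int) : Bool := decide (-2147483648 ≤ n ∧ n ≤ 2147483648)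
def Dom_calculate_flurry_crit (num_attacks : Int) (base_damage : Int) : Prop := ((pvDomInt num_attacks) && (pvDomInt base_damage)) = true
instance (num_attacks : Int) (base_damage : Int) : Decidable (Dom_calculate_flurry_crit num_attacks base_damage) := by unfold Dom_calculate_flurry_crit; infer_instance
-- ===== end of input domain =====

-- B replaces A's per-attack accumulation loop by an O(1) closed form (objective: faster, asymptotic).

-- ===== PORT A =====
def calculate_flurry_crit (num_attacks : Int) (base_damage : Int) : Int :=
  let total_damage :=
    (PySem.List.pyRange (-1) num_attacks 1).foldl
      (fun total_damage i =>
        if i == num_attacks then total_damage + base_damage * 4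
        else total_damage + base_damage * 2) 0
  if num_attacks == 0 then 0 else total_damage

-- ===== PORT B =====
def calculate_flurry_crit_alt (num_attacks : Int) (base_damage : Int) : Int :=
  if num_attacks ≤ 0 then 0 else (num_attacks + 1) * base_damage * 2

-- ===== PRECONDITION & SPEC =====
def Spec_calculate_flurry_crit (num_attacks : Int) (base_damage : Int) (out : Int) : Prop := out = calculate_flurry_crit_alt num_attacks base_damage
instance (num_attacks : Int) (base_damage : Int) (out : Int) : Decidable (Spec_calculate_flurry_crit num_attacks base_damage out) := by unfold Spec_calculate_flurry_crit; infer_instance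

-- ===== CLAIM (what is proved, stated in full; the proofs are below) =====
def Claim_equal_calculate_flurry_crit : Prop := ∀ (num_attacks : Int) (base_damage : Int), Dom_calculate_flurry_crit num_attacks base_damage → Spec_calculate_flurry_crit num_attacks base_damage (calculate_flurry_crit num_attacks base_damage)

-- ===== LEMMAS AND PROOFS =====

-- The i == num_attacks branch never fires inside the loop, so it accumulates a constant per element.
theorem pv_foldl_const (n b : Int) (l : List Int) (h : ∀ i ∈ l, i ≠ n) (t : Int) :
    l.foldl (fun total_damage i =>
        if i == n then total_damage + b * 4 else total_damage + b * 2) t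
      = t + b * 2 * l.length := by
  induction l generalizing t with
  | nil => simp
  | cons x xs ih =>
    have hx : x ≠ n := h x (by simp)
    simp only [List.foldl_cons, beq_iff_eq, if_neg hx] at *
    rw [ih (fun i hi => h i (by simp [hi]))]
    simp only [List.length_cons]
    push_cast
    ring

-- ===== VERDICT (by name: the statement is the Claim_ definition above) =====
theorem calculate_flurry_crit_spec : Claim_equal_calculate_flurry_crit := by
  intro n b _
  show calculate_flurry_crit n b = calculate_flurry_crit_alt n b
  unfold calculate_flurry_crit calculate_flurry_crit_alt
  rw [pv_foldl_const n b _ (fun i hi => by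
        have := (PySem.List.mem_pyRange_one).mp hi
        omega)]
  rw [PySem.List.length_pyRange_one]
  rcases lt_trichotomy n 0 with h | h | h
  · have h1 : (n - (-1)).toNat = 0 := by omega
    simp only [beq_iff_eq, if_neg (show ¬ n = 0 by omega), if_pos (show n ≤ 0 by omega), h1]
    push_cast; ring
  · simp [h]
  · have h1 : ((n - (-1)).toNat : Int) = n + 1 := by omega
    simp only [beq_iff_eq, if_neg (show ¬ n = 0 by omega), if_neg (show ¬ n ≤ 0 by omega)]
    rw [h1]; ring
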